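-- pv_equiv track=rewrite | github.com/14coruma/AI-Class-Projects | a0/arrange_pichus.py | check_diags
-- ===== SOURCE A (Python) =====
-- def check_diags(board, row, col):
--     # Check positive diag "/"
--     r,c = row, col
--     height, width = len(board), len(board[0])
--     while r > 0 and c < width-1:
--         r -= 1
--         c += 1
--         obj = board[r][c]
--         if obj == 'p':
--             return False
--         elif obj == 'X' or obj == '@':
--             break
--     r,c = row, col
--     while r < height-1 and c > 0:
--         r += 1
--         c -= 1
--         obj = board[r][c]
--         if obj == 'p':
--             return False
--         elif obj == 'X' or obj == '@':
--             break
--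
--     # Check negative diag "\"
--     r,c = row, col
--     while r > 0 and c > 0:
--         r -= 1
--         c -= 1
--         obj = board[r][c]
--         if obj == 'p':
--             return False
--         elif obj == 'X' or obj == '@':
--             break
--     r,c = row, col
--     while r < height-1 and c < width-1:
--         r += 1
--         c += 1
--         obj = board[r][c]
--         if obj == 'p':
--             return False
--         elif obj == 'X' or obj == '@':
--             break
--
--     return True
-- ===== SOURCE B (Python) =====
-- def check_diags(board, row, col):
--     height, width = len(board), len(board[0])
--
--     def ray(dr, dc, n):
--         # the diagonal cells in direction (dr, dc), clipped to the board edge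
--         return [board[row + k * dr][col + k * dc] for k in range(1, n + 1)]
--
--     def pichu_first(cells):
--         # pichu visible along this ray iff the first special cell is a pichu
--         specials = [ch for ch in cells if ch in 'pX@']
--         return bool(specials) and specials[0] == 'p'
--
--     rays = [
--         ray(-1, 1, min(row, width - 1 - col)),
--         ray(1, -1, min(height - 1 - row, col)),
--         ray(-1, -1, min(row, col)),
--         ray(1, 1, min(height - 1 - row, width - 1 - col)),
--     ]
--     return not any(pichu_first(cells) for cells in rays)
-- ===== Notes on version B (the rewrite author's own statement) =====
-- stated objective: alternative
-- what changed: Instead of A's four stateful step-by-step walks with break/early-return, B computes each clipped diagonal ray's length in closed form, materialises the ray's cells as lists, filters each list down to its special cells ('p','X','@') and decides visibility by whether the first special cell is a pichu; Pre_ excludes inputs where diagonal indexing raises IndexError (for A, or for B, which reads whole rays where A stops early at a blocker).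
-- outside the precondition, e.g. on check_diags(['...', '.X.', '..'], 0, 0): A returns True, B raises IndexError
import Mathlib
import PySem

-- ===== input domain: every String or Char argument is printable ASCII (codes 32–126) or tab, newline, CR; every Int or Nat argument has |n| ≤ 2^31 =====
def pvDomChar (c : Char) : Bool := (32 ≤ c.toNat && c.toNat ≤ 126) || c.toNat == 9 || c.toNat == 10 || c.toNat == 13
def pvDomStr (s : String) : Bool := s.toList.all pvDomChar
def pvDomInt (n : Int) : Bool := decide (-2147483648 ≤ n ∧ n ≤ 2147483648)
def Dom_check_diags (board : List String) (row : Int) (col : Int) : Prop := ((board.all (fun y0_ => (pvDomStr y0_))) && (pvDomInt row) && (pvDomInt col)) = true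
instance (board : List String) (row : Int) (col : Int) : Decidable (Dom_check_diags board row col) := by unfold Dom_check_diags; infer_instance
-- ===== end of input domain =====

-- B replaces A's four step-by-step guarded walks (with break/early-return) by building each
-- clipped diagonal ray as a list in closed form, filtering its special cells and inspecting the
-- first one (alternative decomposition; same cost). Pre_ excludes inputs where indexing raises.


-- board[r][c] (Python index semantics); under Pre_ every read is in range, so the ' ' default is never used
def pvCell (board : List String) (r c : Int) : Char :=
  (((PySem.List.pyGet? board r).bind fun s => PySem.Str.pyGet? s c)).getD ' '

-- ===== PORT A =====
-- the four while-loops of A, each fueled (under Pre_, fuel = 2*len(board) bounds the iterations)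
def loopA1 (board : List String) (width : Int) (fuel : Nat) (r c : Int) : Bool :=
  match fuel with
  | 0 => true
  | n + 1 =>
    if r > 0 ∧ c < width - 1 then
      let r' := r - 1
      let c' := c + 1
      let obj := pvCell board r' c'
      if obj = 'p' then false
      else if obj = 'X' ∨ obj = '@' then true
      else loopA1 board width n r' c'
    else true

def loopA2 (board : List String) (height : Int) (fuel : Nat) (r c : Int) : Bool :=
  match fuel with
  | 0 => true
  | n + 1 =>
    if r < height - 1 ∧ c > 0 then
      let r' := r + 1
      let c' := c - 1
      let obj := pvCell board r' c'
      if obj = 'p' then false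
      else if obj = 'X' ∨ obj = '@' then true
      else loopA2 board height n r' c'
    else true

def loopA3 (board : List String) (fuel : Nat) (r c : Int) : Bool :=
  match fuel with
  | 0 => true
  | n + 1 =>
    if r > 0 ∧ c > 0 then
      let r' := r - 1
      let c' := c - 1
      let obj := pvCell board r' c'
      if obj = 'p' then false
      else if obj = 'X' ∨ obj = '@' then true
      else loopA3 board n r' c'
    else true

def loopA4 (board : List String) (height width : Int) (fuel : Nat) (r c : Int) : Bool :=
  match fuel with
  | 0 => true
  | n + 1 =>
    if r < height - 1 ∧ c < width - 1 then
      let r' := r + 1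
      let c' := c + 1
      let obj := pvCell board r' c'
      if obj = 'p' then false
      else if obj = 'X' ∨ obj = '@' then true
      else loopA4 board height width n r' c'
    else true

def check_diags (board : List String) (row : Int) (col : Int) : Bool :=
  let height : Int := board.length
  let width : Int := PySem.Str.len (board.headD "")
  let fuel : Nat := 2 * board.length
  loopA1 board width fuel row col &&
  loopA2 board height fuel row col &&
  loopA3 board fuel row col &&
  loopA4 board height width fuel row col

-- ===== PORT B =====
-- [board[row+k*dr][col+k*dc] for k in range(1, n+1)]
def rayB (board : List String) (row col dr dc n : Int) : List Char :=
  (PySem.List.pyRange 1 (n + 1) 1).map (fun k => pvCell board (row + k * dr) (col + k * dc))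

-- specials = [ch for ch in cells if ch in 'pX@']; return bool(specials) and specials[0] == 'p'
def pichuFirst (cells : List Char) : Bool :=
  match cells.filter (fun ch => ch == 'p' || ch == 'X' || ch == '@') with
  | [] => false
  | ch :: _ => ch == 'p'

def check_diags_alt (board : List String) (row : Int) (col : Int) : Bool :=
  let height : Int := board.length
  let width : Int := PySem.Str.len (board.headD "")
  let rays := [rayB board row col (-1) 1 (min row (width - 1 - col)),
               rayB board row col 1 (-1) (min (height - 1 - row) col),
               rayB board row col (-1) (-1) (min row col),
               rayB board row col 1 1 (min (height - 1 - row) (width - 1 - col))]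
  !(rays.any pichuFirst)

-- ===== PRECONDITION & SPEC =====
-- every cell of one clipped diagonal ray is indexable in Python
def rayOK (board : List String) (row col dr dc n : Int) : Prop :=
  ∀ k ∈ List.range n.toNat,
    ((PySem.List.pyGet? board (row + ((k : Int) + 1) * dr)).bind fun s =>
      PySem.Str.pyGet? s (col + ((k : Int) + 1) * dc)) ≠ none

-- Pre_ excludes the inputs on which indexing raises IndexError: board = [] (A raises on len(board[0])),
-- and boards (typically ragged, or with out-of-range coordinates) where some cell of the four
-- edge-clipped diagonal rays is not indexable — there A either raises itself, or stops early at a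
-- blocker/pichu while B, which reads every ray cell, raises.
def Pre_check_diags (board : List String) (row : Int) (col : Int) : Prop :=
  board ≠ [] ∧
  rayOK board row col (-1) 1 (min row (PySem.Str.len (board.headD "") - 1 - col)) ∧
  rayOK board row col 1 (-1) (min ((board.length : Int) - 1 - row) col) ∧
  rayOK board row col (-1) (-1) (min row col) ∧
  rayOK board row col 1 1 (min ((board.length : Int) - 1 - row) (PySem.Str.len (board.headD "") - 1 - col))
instance (board : List String) (row : Int) (col : Int) : Decidable (Pre_check_diags board row col) := by unfold Pre_check_diags rayOK; infer_instance

def pvWitness_check_diags : List String × Int × Int := (["..p", ".X.", "..."], 1, 1)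

def Spec_check_diags (board : List String) (row : Int) (col : Int) (out : Bool) : Prop := out = check_diags_alt board row col
instance (board : List String) (row : Int) (col : Int) (out : Bool) : Decidable (Spec_check_diags board row col out) := by unfold Spec_check_diags; infer_instance

-- ===== CLAIM (what is proved, stated in full; the proofs are below) =====
def Claim_equal_check_diags : Prop := ∀ (board : List String) (row : Int) (col : Int), Dom_check_diags board row col → Pre_check_diags board row col → Spec_check_diags board row col (check_diags board row col)

-- ===== LEMMAS AND PROOFS =====

-- A's single-direction walk, abstracted over the list of cells it visits
def scanA (cells : List Char) : Bool :=
  match cells with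
  | [] => true
  | ch :: rest => if ch = 'p' then false else if ch = 'X' ∨ ch = '@' then true else scanA rest

theorem scanA_eq_not_pichuFirst (cells : List Char) : scanA cells = !pichuFirst cells := by
  induction cells with
  | nil => rfl
  | cons ch rest ih =>
    simp only [scanA, pichuFirst, List.filter]
    by_cases hp : ch = 'p'
    · subst hp; simp
    · by_cases hx : ch = 'X' ∨ ch = '@'
      · rw [if_neg hp, if_pos hx]
        rcases hx with hx | hx <;> subst hx <;> simp
      · rw [if_neg hp, if_neg hx]
        have : (ch == 'p' || ch == 'X' || ch == '@') = false := by
          simp only [not_or] at hx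
          simp [hp, hx.1, hx.2]
        rw [this, ih, pichuFirst]

theorem rayB_nil (board : List String) (row col dr dc n : Int) (h : n ≤ 0) :
    rayB board row col dr dc n = [] := by
  unfold rayB
  rw [PySem.List.pyRange_one_eq_nil (by omega)]
  rfl

theorem rayB_cons (board : List String) (row col dr dc n : Int) (h : 1 ≤ n) :
    rayB board row col dr dc n =
      pvCell board (row + dr) (col + dc) :: rayB board (row + dr) (col + dc) dr dc (n - 1) := by
  unfold rayB
  rw [PySem.List.pyRange_one_cons (by omega : (1 : Int) < n + 1)]
  simp only [List.map_cons, one_mul]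
  congr 1
  rw [PySem.List.pyRange_one, PySem.List.pyRange_one]
  have he : n + 1 - (1 + 1) = n - 1 := by ring
  have he2 : n - 1 + 1 - 1 = n - 1 := by ring
  rw [he, he2]
  simp only [List.map_map]
  apply List.map_congr_left
  intro k _
  simp only [Function.comp_apply]
  congr 1 <;> push_cast <;> ring

theorem pv_row_inrange (board : List String) (r c : Int)
    (h : ((PySem.List.pyGet? board r).bind fun s => PySem.Str.pyGet? s c) ≠ none) :
    -(board.length : Int) ≤ r ∧ r < board.length := by
  cases hg : PySem.List.pyGet? board r with
  | none =>
    rw [hg] at h; simp at h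
  | some s =>
    have hne : PySem.List.pyGet? board r ≠ none := by simp [hg]
    rw [ne_eq, PySem.List.pyGet?_eq_none_iff, not_not] at hne
    simpa [PySem.Raise.InRange] using hne

-- a nonempty safe ray spans in-range row indices, so its length is at most 2*len(board)
theorem rayOK_len_bound (board : List String) (row col dr dc n : Int)
    (hdr : dr = 1 ∨ dr = -1) (h : rayOK board row col dr dc n) :
    n.toNat ≤ 2 * board.length := by
  by_cases hn : n ≤ 0
  · omega
  · have h1 := h 0 (by simp [List.mem_range]; omega)
    have h2 := h (n.toNat - 1) (by simp [List.mem_range]; omega)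
    have hb1 := pv_row_inrange _ _ _ h1
    have hb2 := pv_row_inrange _ _ _ h2
    have hc : ((n.toNat - 1 : Nat) : Int) = n - 1 := by omega
    rw [hc] at hb2
    rcases hdr with hd | hd <;> subst hd <;>
      simp only [Nat.cast_zero, zero_add, mul_one, mul_neg] at hb1 hb2 <;> omega

theorem loopA1_eq_scan (board : List String) (W : Int) :
    ∀ (fuel : Nat) (r c : Int), (min r (W - 1 - c)).toNat ≤ fuel →
      loopA1 board W fuel r c = scanA (rayB board r c (-1) 1 (min r (W - 1 - c))) := by
  intro fuel
  induction fuel with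
  | zero =>
    intro r c h
    rw [rayB_nil board r c (-1) 1 _ (by omega)]
    rfl
  | succ m ih =>
    intro r c h
    simp only [loopA1]
    by_cases hg : r > 0 ∧ c < W - 1
    · rw [if_pos hg, rayB_cons board r c (-1) 1 _ (by omega)]
      have e1 : r + (-1) = r - 1 := by ring
      rw [e1]
      simp only [scanA]
      split_ifs with hp hx
      · rfl
      · rfl
      · have hm : min (r - 1) (W - 1 - (c + 1)) = min r (W - 1 - c) - 1 := by omega
        rw [← hm]
        exact ih (r - 1) (c + 1) (by omega)
    · rw [if_neg hg, rayB_nil board r c (-1) 1 _ (by omega)]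
      rfl

theorem loopA2_eq_scan (board : List String) (H : Int) :
    ∀ (fuel : Nat) (r c : Int), (min (H - 1 - r) c).toNat ≤ fuel →
      loopA2 board H fuel r c = scanA (rayB board r c 1 (-1) (min (H - 1 - r) c)) := by
  intro fuel
  induction fuel with
  | zero =>
    intro r c h
    rw [rayB_nil board r c 1 (-1) _ (by omega)]
    rfl
  | succ m ih =>
    intro r c h
    simp only [loopA2]
    by_cases hg : r < H - 1 ∧ c > 0
    · rw [if_pos hg, rayB_cons board r c 1 (-1) _ (by omega)]
      have e1 : c + (-1) = c - 1 := by ring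
      rw [e1]
      simp only [scanA]
      split_ifs with hp hx
      · rfl
      · rfl
      · have hm : min (H - 1 - (r + 1)) (c - 1) = min (H - 1 - r) c - 1 := by omega
        rw [← hm]
        exact ih (r + 1) (c - 1) (by omega)
    · rw [if_neg hg, rayB_nil board r c 1 (-1) _ (by omega)]
      rfl

theorem loopA3_eq_scan (board : List String) :
    ∀ (fuel : Nat) (r c : Int), (min r c).toNat ≤ fuel →
      loopA3 board fuel r c = scanA (rayB board r c (-1) (-1) (min r c)) := by
  intro fuel
  induction fuel with
  | zero =>
    intro r c h
    rw [rayB_nil board r c (-1) (-1) _ (by omega)]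
    rfl
  | succ m ih =>
    intro r c h
    simp only [loopA3]
    by_cases hg : r > 0 ∧ c > 0
    · rw [if_pos hg, rayB_cons board r c (-1) (-1) _ (by omega)]
      have e1 : r + (-1) = r - 1 := by ring
      have e2 : c + (-1) = c - 1 := by ring
      rw [e1, e2]
      simp only [scanA]
      split_ifs with hp hx
      · rfl
      · rfl
      · have hm : min (r - 1) (c - 1) = min r c - 1 := by omega
        rw [← hm]
        exact ih (r - 1) (c - 1) (by omega)
    · rw [if_neg hg, rayB_nil board r c (-1) (-1) _ (by omega)]
      rfl

theorem loopA4_eq_scan (board : List String) (H W : Int) :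
    ∀ (fuel : Nat) (r c : Int), (min (H - 1 - r) (W - 1 - c)).toNat ≤ fuel →
      loopA4 board H W fuel r c = scanA (rayB board r c 1 1 (min (H - 1 - r) (W - 1 - c))) := by
  intro fuel
  induction fuel with
  | zero =>
    intro r c h
    rw [rayB_nil board r c 1 1 _ (by omega)]
    rfl
  | succ m ih =>
    intro r c h
    simp only [loopA4]
    by_cases hg : r < H - 1 ∧ c < W - 1
    · rw [if_pos hg, rayB_cons board r c 1 1 _ (by omega)]
      simp only [scanA]
      split_ifs with hp hx
      · rfl
      · rfl
      · have hm : min (H - 1 - (r + 1)) (W - 1 - (c + 1)) = min (H - 1 - r) (W - 1 - c) - 1 := by omega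
        rw [← hm]
        exact ih (r + 1) (c + 1) (by omega)
    · rw [if_neg hg, rayB_nil board r c 1 1 _ (by omega)]
      rfl

-- ===== VERDICT (by name: the statement is the Claim_ definition above) =====
theorem check_diags_spec : Claim_equal_check_diags := by
  intro board row col _hdom hpre
  obtain ⟨hne, k1, k2, k3, k4⟩ := hpre
  have b1 := rayOK_len_bound board row col (-1) 1 _ (Or.inr rfl) k1
  have b2 := rayOK_len_bound board row col 1 (-1) _ (Or.inl rfl) k2
  have b3 := rayOK_len_bound board row col (-1) (-1) _ (Or.inr rfl) k3
  have b4 := rayOK_len_bound board row col 1 1 _ (Or.inl rfl) k4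
  unfold Spec_check_diags check_diags check_diags_alt
  simp only [List.any_cons, List.any_nil, Bool.or_false]
  rw [loopA1_eq_scan board (PySem.Str.len (board.headD "")) _ row col b1,
      loopA2_eq_scan board (board.length : Int) _ row col b2,
      loopA3_eq_scan board _ row col b3,
      loopA4_eq_scan board (board.length : Int) (PySem.Str.len (board.headD "")) _ row col b4,
      scanA_eq_not_pichuFirst, scanA_eq_not_pichuFirst, scanA_eq_not_pichuFirst,
      scanA_eq_not_pichuFirst]
  simp [Bool.not_or, Bool.and_assoc]
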